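-- pv_equiv track=rewrite | github.com/thales1020/QuantumTrader-MT5 | docs/examples/risk_manager.py | check_correlation
-- ===== SOURCE A (Python) =====
-- def check_correlation(symbols_in_trade):
--     """
--     Check if symbols have high correlation
--     Prevents over-exposure to same market direction
--
--     Args:
--         symbols_in_trade: List of symbols currently in positions
--
--     Returns:
--         bool: True if correlation is acceptable, False if too high
--     """
--     # Simplified correlation mapping
--     # In production, use actual correlation coefficients
--     correlated_pairs = {
--         'EURUSD': ['GBPUSD', 'EURGBP'],
--         'GBPUSD': ['EURUSD', 'EURGBP'],
--         'USDJPY': ['EURJPY', 'GBPJPY'],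
--         'AUDUSD': ['NZDUSD'],
--         'NZDUSD': ['AUDUSD']
--     }
--
--     # Check each symbol against others
--     for symbol in symbols_in_trade:
--         if symbol in correlated_pairs:
--             for corr_symbol in correlated_pairs[symbol]:
--                 if corr_symbol in symbols_in_trade:
--                     return False  # High correlation detected
--     return True  # Correlation acceptable
-- ===== SOURCE B (Python) =====
-- def check_correlation(symbols_in_trade):
--     """Same check, written as a flat set of undirected correlated edges
--     plus a subset test, instead of a per-symbol adjacency scan."""
--     edges = [
--         ("EURUSD", "GBPUSD"),
--         ("EURUSD", "EURGBP"),
--         ("GBPUSD", "EURGBP"),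
--         ("USDJPY", "EURJPY"),
--         ("USDJPY", "GBPJPY"),
--         ("AUDUSD", "NZDUSD"),
--     ]
--     s = set(symbols_in_trade)
--     return not any(a in s and b in s for a, b in edges)
-- ===== Notes on version B (the rewrite author's own statement) =====
-- stated objective: idiomatic
-- what changed: Replaces the nested per-symbol adjacency-dict scan (with an inner list-membership loop) by a single pass over a flat list of six undirected edge pairs tested against a set built once.
import Mathlib
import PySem

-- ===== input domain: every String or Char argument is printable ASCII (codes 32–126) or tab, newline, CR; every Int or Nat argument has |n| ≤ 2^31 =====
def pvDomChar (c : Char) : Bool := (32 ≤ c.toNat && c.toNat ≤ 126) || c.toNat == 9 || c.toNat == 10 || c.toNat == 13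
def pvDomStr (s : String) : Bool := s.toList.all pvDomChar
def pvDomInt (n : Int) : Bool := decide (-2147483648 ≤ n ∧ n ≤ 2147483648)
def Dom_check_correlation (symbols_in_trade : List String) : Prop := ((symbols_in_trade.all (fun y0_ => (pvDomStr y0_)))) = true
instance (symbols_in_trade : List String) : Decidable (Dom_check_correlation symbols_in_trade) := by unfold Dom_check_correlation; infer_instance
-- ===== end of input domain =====

-- B replaces A's nested per-symbol adjacency scan by one pass over a flat list of
-- undirected edge pairs tested against a set built once (objective: idiomatic).

-- ===== PORT A =====
-- the dict literal 'correlated_pairs'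
def pvCorrDict : PySem.Dict String (List String) :=
  PySem.Dict.mk
  [("EURUSD", ["GBPUSD", "EURGBP"]),
   ("GBPUSD", ["EURUSD", "EURGBP"]),
   ("USDJPY", ["EURJPY", "GBPJPY"]),
   ("AUDUSD", ["NZDUSD"]),
   ("NZDUSD", ["AUDUSD"])]

-- the outer 'for symbol in symbols_in_trade' loop with its early 'return False'
def pvCheckLoop (xs : List String) : List String → Bool
  | [] => true
  | s :: rest =>
    match PySem.Dict.get? pvCorrDict s with    -- 'if symbol in correlated_pairs'
    | some cs =>
      if cs.any (fun c => xs.contains c) then false   -- inner loop with 'if corr_symbol in symbols_in_trade: return False'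
      else pvCheckLoop xs rest
    | none => pvCheckLoop xs rest

def check_correlation (symbols_in_trade : List String) : Bool :=
  pvCheckLoop symbols_in_trade symbols_in_trade

-- ===== PORT B =====
def pvEdges : List (String × String) :=
  [("EURUSD", "GBPUSD"), ("EURUSD", "EURGBP"), ("GBPUSD", "EURGBP"),
   ("USDJPY", "EURJPY"), ("USDJPY", "GBPJPY"), ("AUDUSD", "NZDUSD")]

def check_correlation_alt (symbols_in_trade : List String) : Bool :=
  let s : PySem.Set String := PySem.Set.ofList symbols_in_trade
  !(pvEdges.any (fun e => PySem.Set.contains s e.1 && PySem.Set.contains s e.2))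

-- ===== PRECONDITION & SPEC =====
def Spec_check_correlation (symbols_in_trade : List String) (out : Bool) : Prop := out = check_correlation_alt symbols_in_trade
instance (symbols_in_trade : List String) (out : Bool) : Decidable (Spec_check_correlation symbols_in_trade out) := by unfold Spec_check_correlation; infer_instance

-- ===== CLAIM (what is proved, stated in full; the proofs are below) =====
def Claim_equal_check_correlation : Prop := ∀ (symbols_in_trade : List String), Dom_check_correlation symbols_in_trade → Spec_check_correlation symbols_in_trade (check_correlation symbols_in_trade)

-- ===== LEMMAS AND PROOFS =====

-- the body of A's outer loop, as a predicate on the symbol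
def pvHit (xs : List String) (s : String) : Bool :=
  match PySem.Dict.get? pvCorrDict s with
  | some cs => cs.any (fun c => xs.contains c)
  | none => false

theorem pvCheckLoop_eq_any (xs l : List String) :
    pvCheckLoop xs l = !(l.any (pvHit xs)) := by
  induction l with
  | nil => rfl
  | cons s rest ih =>
    simp only [pvCheckLoop, pvHit, List.any_cons]
    cases h : PySem.Dict.get? pvCorrDict s with
    | none => simp [ih]
    | some cs =>
      dsimp only
      cases hc : cs.any (fun c => xs.contains c) with
      | true => simp
      | false => simp [ih]

-- the five keys' hit conditions, written out
theorem any_pvHit (xs : List String) :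
    xs.any (pvHit xs) =
      ((xs.contains "EURUSD" && (xs.contains "GBPUSD" || xs.contains "EURGBP")) ||
       (xs.contains "GBPUSD" && (xs.contains "EURUSD" || xs.contains "EURGBP")) ||
       (xs.contains "USDJPY" && (xs.contains "EURJPY" || xs.contains "GBPJPY")) ||
       (xs.contains "AUDUSD" && xs.contains "NZDUSD") ||
       (xs.contains "NZDUSD" && xs.contains "AUDUSD")) := by
  rw [Bool.eq_iff_iff]
  constructor
  · intro h
    obtain ⟨s, hs, hhit⟩ := List.any_eq_true.mp h
    by_cases h1 : s = "EURUSD"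
    · subst h1; simp only [pvHit, pvCorrDict, PySem.Dict.get?] at hhit
      simp_all
    by_cases h2 : s = "GBPUSD"
    · subst h2; simp only [pvHit, pvCorrDict, PySem.Dict.get?] at hhit
      simp_all
    by_cases h3 : s = "USDJPY"
    · subst h3; simp only [pvHit, pvCorrDict, PySem.Dict.get?] at hhit
      simp_all
    by_cases h4 : s = "AUDUSD"
    · subst h4; simp only [pvHit, pvCorrDict, PySem.Dict.get?] at hhit
      simp_all
    by_cases h5 : s = "NZDUSD"
    · subst h5; simp only [pvHit, pvCorrDict, PySem.Dict.get?] at hhit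
      simp_all
    · exfalso
      simp only [pvHit, pvCorrDict, PySem.Dict.get?] at hhit
      simp only [List.find?_cons, List.find?_nil] at hhit
      rw [show ("EURUSD" == s) = false from beq_eq_false_iff_ne.mpr (Ne.symm h1),
          show ("GBPUSD" == s) = false from beq_eq_false_iff_ne.mpr (Ne.symm h2),
          show ("USDJPY" == s) = false from beq_eq_false_iff_ne.mpr (Ne.symm h3),
          show ("AUDUSD" == s) = false from beq_eq_false_iff_ne.mpr (Ne.symm h4),
          show ("NZDUSD" == s) = false from beq_eq_false_iff_ne.mpr (Ne.symm h5)] at hhit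
      simp at hhit
  · intro h
    simp only [List.contains_eq_mem, Bool.or_eq_true_iff, Bool.and_eq_true_iff, decide_eq_true_eq] at h
    refine List.any_eq_true.mpr ?_
    rcases h with ((((⟨hm, hr⟩ | ⟨hm, hr⟩) | ⟨hm, hr⟩) | ⟨hm, hr⟩) | ⟨hm, hr⟩)
    · exact ⟨"EURUSD", hm, by rcases hr with hr | hr <;> simp [pvHit, pvCorrDict, PySem.Dict.get?, hr]⟩
    · exact ⟨"GBPUSD", hm, by rcases hr with hr | hr <;> simp [pvHit, pvCorrDict, PySem.Dict.get?, hr]⟩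
    · exact ⟨"USDJPY", hm, by rcases hr with hr | hr <;> simp [pvHit, pvCorrDict, PySem.Dict.get?, hr]⟩
    · exact ⟨"AUDUSD", hm, by simp [pvHit, pvCorrDict, PySem.Dict.get?, hr]⟩
    · exact ⟨"NZDUSD", hm, by simp [pvHit, pvCorrDict, PySem.Dict.get?, hr]⟩

-- the directed (A) and undirected (B) edge disjunctions agree as Boolean formulas
theorem pv_bool_equiv (a b c d e f g h : Bool) :
    ((a && (b || c)) || (b && (a || c)) || (d && (e || f)) || (g && h) || (h && g)) =
    ((a && b) || ((a && c) || ((b && c) || ((d && e) || ((d && f) || (g && h)))))) := by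
  cases a <;> cases b <;> cases c <;> cases d <;> cases e <;> cases f <;> cases g <;> cases h <;> rfl

theorem alt_eq (xs : List String) :
    check_correlation_alt xs =
      !((xs.contains "EURUSD" && xs.contains "GBPUSD") ||
        ((xs.contains "EURUSD" && xs.contains "EURGBP") ||
        ((xs.contains "GBPUSD" && xs.contains "EURGBP") ||
        ((xs.contains "USDJPY" && xs.contains "EURJPY") ||
        ((xs.contains "USDJPY" && xs.contains "GBPJPY") ||
        (xs.contains "AUDUSD" && xs.contains "NZDUSD")))))) := by
  have hc : ∀ y : String, (PySem.Set.ofList xs).contains y = xs.contains y := by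
    intro y
    rw [Bool.eq_iff_iff]
    simp [PySem.Set.mem_ofList]
  simp only [check_correlation_alt, pvEdges, List.any_cons, List.any_nil, Bool.or_false, hc]

-- ===== VERDICT (by name: the statement is the Claim_ definition above) =====
theorem check_correlation_spec : Claim_equal_check_correlation := by
  intro xs _
  unfold Spec_check_correlation check_correlation
  rw [pvCheckLoop_eq_any, any_pvHit, alt_eq, pv_bool_equiv]
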